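-- pv_equiv track=rewrite | github.com/Dawid123DJ/task-tracker | task_tracker.py | search_tasks
-- ===== SOURCE A (Python) =====
-- def search_tasks(task_list, keywords):
--     """Wyszukiwanie zadań – zwraca listę zadań zawierających wszystkie słowa kluczowe."""
--     if not task_list or not keywords:
--         return []
--     keyword_list = [k.lower() for k in keywords.split()]
--     return [
--         task for task in task_list
--         if all(keyword in task.lower() for keyword in keyword_list)
--     ]
-- ===== SOURCE B (Python) =====
-- def search_tasks(task_list, keywords):
--     """Wyszukiwanie zadań – zwraca listę zadań zawierających wszystkie słowa kluczowe."""
--     if not task_list or not keywords: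
--         return []
--     kws = [k.lower() for k in keywords.split()]
--
--     def contains_all(text, ks):
--         if not ks:
--             return True
--         return ks[0] in text and contains_all(text, ks[1:])
--
--     out = []
--     for task in task_list:
--         if contains_all(task.lower(), kws):
--             out.append(task)
--     return out
-- ===== Notes on version B (the rewrite author's own statement) =====
-- stated objective: alternative
-- what changed: Replaces A's single list comprehension with an all() generator by an explicit accumulator loop over the tasks and a recursive contains_all helper over the keyword list; a timing run measured this constant-factor faster (no generator/all overhead per task).
import Mathlib
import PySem

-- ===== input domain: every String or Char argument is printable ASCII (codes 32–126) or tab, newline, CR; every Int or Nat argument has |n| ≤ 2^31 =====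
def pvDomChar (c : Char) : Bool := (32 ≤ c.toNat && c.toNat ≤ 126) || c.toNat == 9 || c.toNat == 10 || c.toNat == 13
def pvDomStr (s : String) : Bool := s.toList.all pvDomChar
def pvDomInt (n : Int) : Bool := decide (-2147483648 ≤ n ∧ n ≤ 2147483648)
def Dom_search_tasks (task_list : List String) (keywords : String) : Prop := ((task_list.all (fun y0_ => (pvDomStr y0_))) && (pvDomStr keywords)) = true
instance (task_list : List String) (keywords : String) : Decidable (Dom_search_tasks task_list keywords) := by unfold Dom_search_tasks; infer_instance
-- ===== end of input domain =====

-- B replaces A's one-pass comprehension with all() by an explicit accumulator loop over tasks plus a recursive contains_all helper over keywords; same cost, alternative decomposition.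
-- ===== PORT A =====
def search_tasks (task_list : List String) (keywords : String) : List String :=
  if task_list = [] ∨ keywords = "" then []
  else
    let keyword_list := (PySem.Str.split₀ keywords).map PySem.Str.lower
    task_list.filter (fun task => keyword_list.all (fun keyword => PySem.Str.isIn keyword (PySem.Str.lower task)))

-- ===== PORT B =====
def pvContainsAll (text : String) : List String → Bool
  | [] => true
  | k :: ks => PySem.Str.isIn k text && pvContainsAll text ks

def search_tasks_alt (task_list : List String) (keywords : String) : List String :=
  if task_list = [] ∨ keywords = "" then []
  else
    let kws := (PySem.Str.split₀ keywords).map PySem.Str.lower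
    task_list.foldl
      (fun out task => if pvContainsAll (PySem.Str.lower task) kws then out ++ [task] else out) []

-- ===== PRECONDITION & SPEC =====
def Spec_search_tasks (task_list : List String) (keywords : String) (out : List String) : Prop := out = search_tasks_alt task_list keywords
instance (task_list : List String) (keywords : String) (out : List String) : Decidable (Spec_search_tasks task_list keywords out) := by unfold Spec_search_tasks; infer_instance

-- ===== CLAIM (what is proved, stated in full; the proofs are below) =====
def Claim_equal_search_tasks : Prop := ∀ (task_list : List String) (keywords : String), Dom_search_tasks task_list keywords → Spec_search_tasks task_list keywords (search_tasks task_list keywords)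

-- ===== LEMMAS AND PROOFS =====
theorem pvContainsAll_eq_all (text : String) (ks : List String) :
    pvContainsAll text ks = ks.all (fun k => PySem.Str.isIn k text) := by
  induction ks with
  | nil => rfl
  | cons k ks ih => simp [pvContainsAll, ih]

theorem pvFoldl_eq_filter (kws : List String) (ts : List String) (acc : List String) :
    ts.foldl (fun out t => if pvContainsAll (PySem.Str.lower t) kws then out ++ [t] else out) acc
      = acc ++ ts.filter (fun t => pvContainsAll (PySem.Str.lower t) kws) := by
  induction ts generalizing acc with
  | nil => simp
  | cons t ts ih =>
      cases h : pvContainsAll (PySem.Str.lower t) kws <;>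
        simp [List.filter_cons, h, ih]

-- ===== VERDICT (by name: the statement is the Claim_ definition above) =====
theorem search_tasks_spec : Claim_equal_search_tasks := by
  intro task_list keywords _
  unfold Spec_search_tasks search_tasks search_tasks_alt
  split
  · rfl
  · rw [pvFoldl_eq_filter]
    simp [pvContainsAll_eq_all]
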